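-- pv_equiv track=rewrite | github.com/MeetWithAnkita/Basic_Python | Assignment04/3.py | find_consecutive_numbers
-- ===== SOURCE A (Python) =====
-- def find_consecutive_numbers(limit):
--     result = []
--
--     for n in range(limit - 4):
--         sum_squares_first_three = n**2 + (n+1)**2 + (n+2)**2
--         sum_squares_last_two = (n+3)**2 + (n+4)**2
--         if sum_squares_first_three == sum_squares_last_two:
--             result.append((n, n+1, n+2, n+3, n+4))
--
--     return result
-- ===== SOURCE B (Python) =====
-- def find_consecutive_numbers(limit):
--     # n^2+(n+1)^2+(n+2)^2 == (n+3)^2+(n+4)^2  <=>  n^2 - 8n - 20 = 0  <=>  n in {10, -2};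
--     # only n = 10 lies in range(limit - 4), and it does iff limit >= 15.
--     return [(10, 11, 12, 13, 14)] if limit >= 15 else []
-- ===== Notes on version B (the rewrite author's own statement) =====
-- stated objective: faster
-- what changed: Replaced the linear scan over range(limit-4) by the closed-form solution of the quadratic n^2-8n-20=0: only n=10 qualifies, so B returns [(10,11,12,13,14)] iff limit >= 15, in O(1).
import Mathlib
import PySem

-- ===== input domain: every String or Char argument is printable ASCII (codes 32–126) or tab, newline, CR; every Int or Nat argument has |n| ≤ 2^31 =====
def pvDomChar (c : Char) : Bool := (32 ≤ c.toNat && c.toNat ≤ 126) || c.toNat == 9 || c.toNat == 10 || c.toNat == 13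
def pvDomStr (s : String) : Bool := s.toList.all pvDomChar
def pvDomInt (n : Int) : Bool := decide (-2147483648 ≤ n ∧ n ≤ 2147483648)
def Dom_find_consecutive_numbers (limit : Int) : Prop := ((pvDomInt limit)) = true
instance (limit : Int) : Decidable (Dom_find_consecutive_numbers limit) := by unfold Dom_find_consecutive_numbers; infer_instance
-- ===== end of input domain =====

-- B replaces A's linear scan by the closed-form root n = 10 of the quadratic the condition reduces to (objective: faster).

-- ===== PORT A =====
def find_consecutive_numbers (limit : Int) : List (List Int) :=
  (PySem.List.pyRange 0 (limit - 4) 1).foldl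
    (fun result n =>
      let sum_squares_first_three := n ^ 2 + (n + 1) ^ 2 + (n + 2) ^ 2
      let sum_squares_last_two := (n + 3) ^ 2 + (n + 4) ^ 2
      if sum_squares_first_three = sum_squares_last_two then
        result ++ [[n, n + 1, n + 2, n + 3, n + 4]]
      else result) []

-- ===== PORT B =====
def find_consecutive_numbers_alt (limit : Int) : List (List Int) :=
  if 15 ≤ limit then [[10, 11, 12, 13, 14]] else []

-- ===== PRECONDITION & SPEC =====
def Spec_find_consecutive_numbers (limit : Int) (out : List (List Int)) : Prop := out = find_consecutive_numbers_alt limit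
instance (limit : Int) (out : List (List Int)) : Decidable (Spec_find_consecutive_numbers limit out) := by unfold Spec_find_consecutive_numbers; infer_instance

-- ===== CLAIM (what is proved, stated in full; the proofs are below) =====
def Claim_equal_find_consecutive_numbers : Prop := ∀ (limit : Int), Dom_find_consecutive_numbers limit → Spec_find_consecutive_numbers limit (find_consecutive_numbers limit)

-- ===== LEMMAS AND PROOFS =====

-- A's loop over List.range k, in closed form: n = 10 is the only index satisfying the condition.
theorem pv_foldl_range (k : Nat) :
    ((List.range k).map (fun j : Nat => (0 : Int) + (j : Int))).foldl
      (fun result n =>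
        let sum_squares_first_three := n ^ 2 + (n + 1) ^ 2 + (n + 2) ^ 2
        let sum_squares_last_two := (n + 3) ^ 2 + (n + 4) ^ 2
        if sum_squares_first_three = sum_squares_last_two then
          result ++ [[n, n + 1, n + 2, n + 3, n + 4]]
        else result) []
    = if 11 ≤ k then [[10, 11, 12, 13, 14]] else [] := by
  induction k with
  | zero => simp
  | succ k ih =>
    rw [List.range_succ, List.map_append, List.foldl_append, ih]
    simp only [List.map_cons, List.map_nil, List.foldl_cons, List.foldl_nil]
    have hcond : (k : Int) ^ 2 + ((k : Int) + 1) ^ 2 + ((k : Int) + 2) ^ 2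
        = ((k : Int) + 3) ^ 2 + ((k : Int) + 4) ^ 2 ↔ k = 10 := by
      constructor
      · intro h
        have h' : ((k : Int) - 10) * ((k : Int) + 2) = 0 := by ring_nf; ring_nf at h; omega
        rcases mul_eq_zero.mp h' with h10 | h2 <;> omega
      · intro h; subst h; norm_num
    simp only [zero_add]
    by_cases hk : k = 10
    · subst hk; norm_num
    · rw [if_neg (fun h => hk (hcond.mp h))]
      by_cases h11 : 11 ≤ k
      · rw [if_pos h11, if_pos (by omega)]
      · rw [if_neg h11, if_neg (by omega)]

-- ===== VERDICT (by name: the statement is the Claim_ definition above) =====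
theorem find_consecutive_numbers_spec : Claim_equal_find_consecutive_numbers := by
  intro limit _
  unfold Spec_find_consecutive_numbers find_consecutive_numbers find_consecutive_numbers_alt
  rw [PySem.List.pyRange_one, pv_foldl_range]
  by_cases h : 15 ≤ limit
  · rw [if_pos h, if_pos (by omega)]
  · rw [if_neg h, if_neg (by omega)]
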